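-- pv_equiv track=rewrite | github.com/wingon1/py-algorithm | Greedy/greedy01.py | greedy02
-- ===== SOURCE A (Python) =====
-- def greedy02(items, M, K):
--     items.sort(reverse=True)
--     res = 0
--     kcout = 0
--
--     for i in range(M):
--         if (K > kcout):
--             res += items[0]
--             kcout += 1
--         else:
--             res += items[1]
--             kcout = 0
--
--     return res
-- ===== SOURCE B (Python) =====
-- def greedy02(items, M, K):
--     # Closed-form over the repeating cycle (K copies of the max, then one
--     # second-max) instead of iterating M times.  Sorts items in place like A.
--     items.sort(reverse=True)
--     if M <= 0:
--         return 0
--     if K <= 0: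
--         return M * items[1]
--     if M <= K:
--         return M * items[0]
--     q, r = divmod(M, K + 1)
--     return q * (K * items[0] + items[1]) + r * items[0]
-- ===== Notes on version B (the rewrite author's own statement) =====
-- stated objective: alternative
-- what changed: The M-iteration accumulation loop is replaced by closed-form arithmetic over the cycle of length K+1 (q full cycles contribute q*(K*max+second), the remainder r contributes r*max), keeping only the sort.
import Mathlib
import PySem

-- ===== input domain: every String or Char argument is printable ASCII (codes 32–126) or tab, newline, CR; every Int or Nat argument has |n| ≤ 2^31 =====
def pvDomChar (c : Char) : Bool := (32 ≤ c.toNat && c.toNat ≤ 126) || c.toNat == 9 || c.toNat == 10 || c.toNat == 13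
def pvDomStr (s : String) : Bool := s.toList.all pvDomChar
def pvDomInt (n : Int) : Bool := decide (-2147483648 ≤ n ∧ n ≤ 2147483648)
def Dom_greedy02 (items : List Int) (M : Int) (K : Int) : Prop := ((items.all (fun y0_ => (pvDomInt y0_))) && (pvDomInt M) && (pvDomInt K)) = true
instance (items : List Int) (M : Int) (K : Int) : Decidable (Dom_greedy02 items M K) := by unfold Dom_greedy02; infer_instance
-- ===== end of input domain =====

-- B replaces A's M-iteration loop by closed-form cycle arithmetic over the cycle of length K+1 (objective: alternative).
-- Both A and B sort `items` in place in Python; the equivalence proved here is about the return value.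


-- ===== PORT A =====
def greedy02 (items : List Int) (M : Int) (K : Int) : Int :=
  let s := PySem.List.sorted items (fun x => x) true
  let a := (PySem.List.pyGet? s 0).getD 0   -- items[0]; none (IndexError) excluded by Pre_
  let b := (PySem.List.pyGet? s 1).getD 0   -- items[1]; none (IndexError) excluded by Pre_
  ((PySem.List.pyRange 0 M 1).foldl
      (fun (st : Int × Int) _ =>
        if K > st.2 then (st.1 + a, st.2 + 1) else (st.1 + b, 0))
      (0, 0)).1

-- ===== PORT B =====
def greedy02_alt (items : List Int) (M : Int) (K : Int) : Int :=
  let s := PySem.List.sorted items (fun x => x) true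
  let a := (PySem.List.pyGet? s 0).getD 0   -- items[0]; none (IndexError) excluded by Pre_
  let b := (PySem.List.pyGet? s 1).getD 0   -- items[1]; none (IndexError) excluded by Pre_
  if M ≤ 0 then 0
  else if K ≤ 0 then M * b
  else if M ≤ K then M * a
  else
    let q := PySem.Int.floordiv M (K + 1)
    let r := PySem.Int.mod M (K + 1)
    q * (K * a + b) + r * a

-- ===== PRECONDITION & SPEC =====
-- Pre_ excludes exactly the inputs where Python A raises IndexError: with M > 0 the loop
-- reads items[0] (and items[1] as soon as K ≤ 0 or K < M) from a too-short list.
def Pre_greedy02 (items : List Int) (M : Int) (K : Int) : Prop :=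
  M ≤ 0 ∨ (0 < K ∧ M ≤ K ∧ 1 ≤ items.length) ∨ 2 ≤ items.length
instance (items : List Int) (M : Int) (K : Int) : Decidable (Pre_greedy02 items M K) := by
  unfold Pre_greedy02; infer_instance

def pvWitness_greedy02 : List Int × Int × Int := ([3, 1], 7, 2)

def Spec_greedy02 (items : List Int) (M : Int) (K : Int) (out : Int) : Prop := out = greedy02_alt items M K
instance (items : List Int) (M : Int) (K : Int) (out : Int) : Decidable (Spec_greedy02 items M K out) := by unfold Spec_greedy02; infer_instance

-- ===== CLAIM (what is proved, stated in full; the proofs are below) =====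
def Claim_equal_greedy02 : Prop := ∀ (items : List Int) (M : Int) (K : Int), Dom_greedy02 items M K → Pre_greedy02 items M K → Spec_greedy02 items M K (greedy02 items M K)

-- ===== LEMMAS AND PROOFS =====

-- The amount A's loop adds in n iterations starting from counter kc.
def gLoop (a b K : Int) : Nat → Int → Int
  | 0, _ => 0
  | n + 1, kc => if K > kc then a + gLoop a b K n (kc + 1) else b + gLoop a b K n 0

lemma fold_fst (a b K : Int) (l : List Int) (res kc : Int) :
    (l.foldl (fun (st : Int × Int) _ =>
        if K > st.2 then (st.1 + a, st.2 + 1) else (st.1 + b, 0)) (res, kc)).1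
      = res + gLoop a b K l.length kc := by
  induction l generalizing res kc with
  | nil => simp [gLoop]
  | cons x t ih =>
    simp only [List.foldl_cons, List.length_cons, gLoop]
    by_cases h : K > kc
    · simp only [if_pos h, ih]; ring
    · simp only [if_neg h, ih]; ring

lemma gLoop_nonpos (a b K : Int) (hK : K ≤ 0) : ∀ n : Nat, gLoop a b K n 0 = n * b := by
  intro n
  induction n with
  | zero => simp [gLoop]
  | succ n ih =>
    have h : ¬ K > (0 : Int) := by omega
    simp only [gLoop, if_neg h, ih]
    push_cast; ring

lemma gLoop_small (a b K : Int) : ∀ (r : Nat) (c : Int), c + r ≤ K → gLoop a b K r c = r * a := by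
  intro r
  induction r with
  | zero => intro c _; simp [gLoop]
  | succ r ih =>
    intro c hc
    have h : K > c := by push_cast at hc ⊢; omega
    have hc' : (c + 1) + (r : Int) ≤ K := by push_cast at hc ⊢; omega
    simp only [gLoop, if_pos h, ih (c + 1) hc']
    push_cast; ring

lemma gLoop_cycle (a b K : Int) : ∀ (j : Nat) (c : Int) (m : Nat), c + j = K →
    gLoop a b K (m + j + 1) c = j * a + b + gLoop a b K m 0 := by
  intro j
  induction j with
  | zero =>
    intro c m hc
    have h : ¬ K > c := by push_cast at hc; omega
    simp only [gLoop, if_neg h]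
    push_cast; ring
  | succ j ih =>
    intro c m hc
    have h : K > c := by push_cast at hc; omega
    have harg : m + (j + 1) + 1 = (m + j + 1) + 1 := by omega
    rw [harg]
    show (if K > c then a + gLoop a b K (m + j + 1) (c + 1)
          else b + gLoop a b K (m + j + 1) 0) = _
    rw [if_pos h, ih (c + 1) m (by push_cast at hc ⊢; omega)]
    push_cast; ring

lemma gLoop_closed (a b K : Int) (hK : 0 < K) :
    ∀ (q r : Nat), (r : Int) ≤ K →
      gLoop a b K (q * (K.toNat + 1) + r) 0 = q * (K * a + b) + r * a := by
  intro q
  induction q with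
  | zero =>
    intro r hr
    simp only [Nat.zero_mul, Nat.zero_add]
    rw [gLoop_small a b K r 0 (by omega)]
    push_cast; ring
  | succ q ih =>
    intro r hr
    have harg : (q + 1) * (K.toNat + 1) + r = (q * (K.toNat + 1) + r) + K.toNat + 1 := by ring
    have hKt : ((K.toNat : Int)) = K := by omega
    rw [harg, gLoop_cycle a b K K.toNat 0 (q * (K.toNat + 1) + r) (by omega), ih r hr]
    rw [hKt]; push_cast; ring

-- ===== VERDICT (by name: the statement is the Claim_ definition above) =====
theorem greedy02_spec : Claim_equal_greedy02 := by
  intro items M K _ _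
  unfold Spec_greedy02 greedy02 greedy02_alt
  set s := PySem.List.sorted items (fun x => x) true with hs
  set a := (PySem.List.pyGet? s 0).getD 0 with ha
  set b := (PySem.List.pyGet? s 1).getD 0 with hb
  simp only []
  by_cases hM : M ≤ 0
  · rw [PySem.List.pyRange_one_eq_nil (by omega), if_pos hM]
    simp
  · rw [if_neg hM]
    have hlen : (PySem.List.pyRange 0 M 1).length = M.toNat := by
      rw [PySem.List.length_pyRange_one]; omega
    rw [fold_fst, hlen, zero_add]
    by_cases hK : K ≤ 0
    · rw [if_pos hK, gLoop_nonpos a b K hK]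
      have : ((M.toNat : Int)) = M := by omega
      rw [this]
    · rw [if_neg hK]
      by_cases hMK : M ≤ K
      · rw [if_pos hMK, gLoop_small a b K M.toNat 0 (by omega)]
        have : ((M.toNat : Int)) = M := by omega
        rw [this]
      · rw [if_neg hMK]
        have hpos : (0 : Int) < K + 1 := by omega
        have hq : PySem.Int.floordiv M (K + 1) = M / (K + 1) :=
          PySem.Int.floordiv_eq_ediv_of_pos hpos
        have hr : PySem.Int.mod M (K + 1) = M % (K + 1) :=
          PySem.Int.mod_eq_emod_of_pos hpos
        set q := M / (K + 1) with hqdef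
        set r := M % (K + 1) with hrdef
        have hsum : q * (K + 1) + r = M := by rw [hqdef, hrdef]; exact Int.ediv_mul_add_emod M (K + 1)
        have hr0 : 0 ≤ r := Int.emod_nonneg M (by omega)
        have hr1 : r < K + 1 := Int.emod_lt_of_pos M hpos
        have hq0 : 0 ≤ q := Int.ediv_nonneg (by omega) (by omega)
        have e1 : ((q.toNat : Int)) = q := by omega
        have e2 : ((r.toNat : Int)) = r := by omega
        have e3 : ((K.toNat : Int)) = K := by omega
        have hnat : M.toNat = q.toNat * (K.toNat + 1) + r.toNat := by
          have hcast : ((q.toNat * (K.toNat + 1) + r.toNat : Nat) : Int) = M := by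
            push_cast; rw [e1, e2, e3]; exact hsum
          omega
        rw [hq, hr, hnat,
          gLoop_closed a b K (by omega) q.toNat r.toNat (by omega)]
        rw [e1, e2]
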